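-- pv_equiv track=rewrite | github.com/565785929/GraphECH | final.py | get_con_list
-- ===== SOURCE A (Python) =====
-- def dec2bin(dec):
--     bin_result = ''
--     if dec:
--         bin_result = dec2bin(dec // 2)
--         bin_result += str(dec % 2)
--     else:
--         bin_result = bin_result
--     return bin_result
--
-- def add_len(bin_result, bin_len):
--     added_result = bin_result
--     if len(bin_result) != bin_len:
--         for time in range(bin_len - len(bin_result)):
--             added_result = '0' + added_result
--
--     return added_result
--
-- def get_con_list(left_useful_points):
--     result_lists = []
--     bin_len = len(left_useful_points)
--     for time in range(1, 2 ** bin_len):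
--         bin_result = dec2bin(time)
--         added_result = add_len(bin_result, bin_len)
--         result_lists.append(list(added_result))
--
--     return result_lists
-- ===== SOURCE B (Python) =====
-- def get_con_list(left_useful_points):
--     # Grow all bit patterns breadth-first (doubling per position), then drop the all-zero one.
--     patterns = [[]]
--     for _ in left_useful_points:
--         patterns = [p + [c] for p in patterns for c in '01']
--     return patterns[1:]
-- ===== Notes on version B (the rewrite author's own statement) =====
-- stated objective: simpler
-- what changed: Instead of converting each counter value 1..2**n-1 to a binary string via recursive division and left-padding it, B builds all n-bit patterns breadth-first by appending '0'/'1' to each shorter pattern, then drops the leading all-zero pattern.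
import Mathlib
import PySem

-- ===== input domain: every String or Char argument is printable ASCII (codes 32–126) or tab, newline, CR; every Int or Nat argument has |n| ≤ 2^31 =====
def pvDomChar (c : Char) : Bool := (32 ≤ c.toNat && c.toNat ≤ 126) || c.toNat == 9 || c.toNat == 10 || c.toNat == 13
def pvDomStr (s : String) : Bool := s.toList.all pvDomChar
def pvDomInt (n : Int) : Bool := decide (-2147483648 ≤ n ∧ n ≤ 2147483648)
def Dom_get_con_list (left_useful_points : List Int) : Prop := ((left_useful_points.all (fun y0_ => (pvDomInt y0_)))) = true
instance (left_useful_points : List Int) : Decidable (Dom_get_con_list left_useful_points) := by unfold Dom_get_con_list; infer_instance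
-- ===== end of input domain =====

-- B replaces the per-counter decimal-to-binary conversion and padding with a breadth-first
-- doubling of bit patterns followed by dropping the all-zero pattern; same values, simpler code.

-- ===== PORT A =====
-- dec2bin: the Python recurses on dec // 2; get_con_list only calls it with dec ≥ 1, and for
-- dec < 0 the Python recursion diverges, so the port recurses on dec.toNat (exact for dec ≥ 0).
def dec2binGo : Nat → String
  | 0 => ""
  | (m+1) => dec2binGo ((m+1) / 2) ++ PySem.Int.toStr (PySem.Int.mod ((m : Int) + 1) 2)

def dec2bin (dec : Int) : String := dec2binGo dec.toNat

def add_len (bin_result : String) (bin_len : Int) : String :=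
  if PySem.Str.len bin_result ≠ bin_len then
    (PySem.List.pyRange 0 (bin_len - PySem.Str.len bin_result) 1).foldl
      (fun added_result _ => "0" ++ added_result) bin_result
  else bin_result

def get_con_list (left_useful_points : List Int) : List (List String) :=
  let bin_len : Int := left_useful_points.length
  (PySem.List.pyRange 1 ((2 : Int) ^ left_useful_points.length) 1).foldl
    (fun result_lists time =>
      result_lists ++ [(add_len (dec2bin time) bin_len).toList.map (fun c => String.ofList [c])])
    []

-- ===== PORT B =====
def get_con_list_alt (left_useful_points : List Int) : List (List String) :=
  (left_useful_points.foldl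
    (fun patterns _ => patterns.flatMap (fun p => ["0", "1"].map (fun c => p ++ [c])))
    [[]]).drop 1

-- ===== PRECONDITION & SPEC =====
def Spec_get_con_list (left_useful_points : List Int) (out : List (List String)) : Prop := out = get_con_list_alt left_useful_points
instance (left_useful_points : List Int) (out : List (List String)) : Decidable (Spec_get_con_list left_useful_points out) := by unfold Spec_get_con_list; infer_instance

-- ===== CLAIM (what is proved, stated in full; the proofs are below) =====
def Claim_equal_get_con_list : Prop := ∀ (left_useful_points : List Int), Dom_get_con_list left_useful_points → Spec_get_con_list left_useful_points (get_con_list left_useful_points)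

-- ===== LEMMAS AND PROOFS =====

-- characters produced by dec2binGo
def binChars : Nat → List Char
  | 0 => []
  | (m+1) => binChars ((m+1) / 2) ++ [if (m+1) % 2 = 1 then '1' else '0']

-- the n-bit binary pattern of j, low bit last
def bitsC : Nat → Nat → List Char
  | 0, _ => []
  | (n+1), j => bitsC n (j / 2) ++ [if j % 2 = 1 then '1' else '0']

def pvStep (pats : List (List String)) : List (List String) :=
  pats.flatMap (fun p => ["0", "1"].map (fun c => p ++ [c]))

def pvBits (n i : Nat) : List String := (bitsC n i).map (fun c => String.ofList [c])

theorem pymod_two (m : Nat) : PySem.Int.mod ((m:Int)+1) 2 = (((m+1) % 2 : Nat) : Int) := by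
  simp [PySem.Int.mod, Int.fmod_eq_emod]

theorem dec2binGo_toList (m : Nat) : (dec2binGo m).toList = binChars m := by
  induction m using Nat.strong_induction_on with
  | _ m ih =>
    rcases m with _ | k
    · simp [dec2binGo, binChars]
    · rw [dec2binGo, binChars]
      have h2 := ih ((k+1)/2) (by omega)
      rw [String.toList_append, h2, pymod_two]
      rcases Nat.mod_two_eq_zero_or_one (k+1) with h | h <;> rw [h] <;> simp <;> decide

theorem binChars_length_le (n : Nat) : ∀ t, t < 2 ^ n → (binChars t).length ≤ n := by
  induction n with
  | zero => intro t ht; interval_cases t; simp [binChars]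
  | succ n ih =>
    intro t ht
    rcases t with _ | k
    · simp [binChars]
    · rw [binChars]
      have := ih ((k+1)/2) (by omega)
      simp; omega

theorem pad_eq_bitsC (n : Nat) : ∀ t, t < 2 ^ n →
    List.replicate (n - (binChars t).length) '0' ++ binChars t = bitsC n t := by
  induction n with
  | zero => intro t ht; interval_cases t; simp [binChars, bitsC]
  | succ n ih =>
    intro t ht
    rcases t with _ | k
    · have h0 := ih 0 (by positivity)
      simp [binChars, bitsC] at h0 ⊢
      rw [← h0, ← List.replicate_succ']
    · have hlt : (k+1)/2 < 2 ^ n := by omega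
      have hlen := binChars_length_le n ((k+1)/2) hlt
      rw [binChars, bitsC, ← ih ((k+1)/2) hlt]
      have hsub : n + 1 - ((binChars ((k+1)/2)).length + 1)
          = n - (binChars ((k+1)/2)).length := by omega
      simp [hsub]

theorem foldl_prepend_zero (l : List Int) (s : String) :
    (l.foldl (fun a _ => "0" ++ a) s).toList = List.replicate l.length '0' ++ s.toList := by
  induction l generalizing s with
  | nil => simp
  | cons x xs ih =>
    simp only [List.foldl_cons, ih, String.toList_append, List.length_cons]
    simp [List.replicate_succ', List.append_assoc]

theorem add_len_toList (s : String) (n : Nat) (h : s.toList.length ≤ n) :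
    (add_len s (n : Int)).toList = List.replicate (n - s.toList.length) '0' ++ s.toList := by
  unfold add_len
  rw [PySem.Str.len_eq]
  by_cases he : s.toList.length = n
  · simp [he]
  · rw [if_pos (by exact_mod_cast he), foldl_prepend_zero, PySem.List.length_pyRange_one]
    congr 1
    congr 1
    omega

theorem pvRangeTwoMul {α : Type} (g : Nat → α) (m : Nat) :
    (List.range (2*m)).map g = (List.range m).flatMap (fun i => [g (2*i), g (2*i+1)]) := by
  induction m with
  | zero => simp
  | succ m ih =>
    have h : 2*(m+1) = (2*m+1)+1 := by ring
    rw [h, List.range_succ, List.range_succ, List.range_succ, List.flatMap_append]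
    simp [ih]

theorem bitsC_even (n i : Nat) : bitsC (n+1) (2*i) = bitsC n i ++ ['0'] := by
  have h1 : (2*i)/2 = i := by omega
  have h2 : (2*i) % 2 = 0 := by omega
  rw [bitsC, h1, h2]; simp

theorem bitsC_odd (n i : Nat) : bitsC (n+1) (2*i+1) = bitsC n i ++ ['1'] := by
  have h1 : (2*i+1)/2 = i := by omega
  have h2 : (2*i+1) % 2 = 1 := by omega
  rw [bitsC, h1, h2]; simp

theorem step_pats (n : Nat) :
    pvStep ((List.range (2^n)).map (pvBits n)) = (List.range (2^(n+1))).map (pvBits (n+1)) := by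
  have h : 2^(n+1) = 2 * 2^n := by ring
  rw [pvStep, h, pvRangeTwoMul, List.flatMap_map]
  apply List.flatMap_congr
  intro i _
  simp [pvBits, bitsC_even, bitsC_odd]

theorem foldl_step (l : List Int) : ∀ n : Nat,
    l.foldl (fun pats _ => pvStep pats) ((List.range (2^n)).map (pvBits n))
      = (List.range (2^(n+l.length))).map (pvBits (n+l.length)) := by
  induction l with
  | nil => intro n; simp
  | cons x xs ih =>
    intro n
    rw [List.foldl_cons, step_pats, ih (n+1)]
    simp [Nat.add_comm, Nat.add_left_comm]

theorem get_con_list_eq_alt (l : List Int) : get_con_list l = get_con_list_alt l := by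
  unfold get_con_list get_con_list_alt
  set L := l.length with hL
  have hinit : ([[]] : List (List String)) = (List.range (2^0)).map (pvBits 0) := by
    simp [pvBits, bitsC]
  have hB : l.foldl (fun patterns _ => patterns.flatMap (fun p => ["0", "1"].map (fun c => p ++ [c]))) [[]]
      = (List.range (2^L)).map (pvBits L) := by
    rw [hinit]
    have := foldl_step l 0
    simpa [pvStep] using this
  rw [hB]
  rw [PySem.List.foldl_append_singleton_eq_map]
  have hM : ((2:Int) ^ L - 1).toNat = 2^L - 1 := by
    have : ((2:Int) ^ L) = ((2^L : Nat) : Int) := by push_cast; ring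
    omega
  rw [PySem.List.pyRange_one, hM]
  simp only [List.map_map, List.nil_append]
  have hpos : 2^L = (2^L - 1) + 1 := by
    have := Nat.one_le_two_pow (n := L); omega
  rw [hpos, List.range_succ_eq_map, List.map_cons, List.drop_one, List.tail_cons, List.map_map]
  simp only [Nat.add_sub_cancel]
  apply List.map_congr_left
  intro k hk
  rw [List.mem_range] at hk
  have hk1 : k + 1 < 2^L := by omega
  have htoNat : ((1:Int) + (k:Nat)).toNat = k + 1 := by omega
  simp only [Function.comp_apply, dec2bin, htoNat]
  have hlen : (dec2binGo (k+1)).toList.length ≤ L := by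
    rw [dec2binGo_toList]; exact binChars_length_le L (k+1) hk1
  rw [add_len_toList _ _ hlen, dec2binGo_toList]
  rw [pad_eq_bitsC L (k+1) hk1]
  simp [pvBits, Nat.succ_eq_add_one]

-- ===== VERDICT (by name: the statement is the Claim_ definition above) =====
theorem get_con_list_spec : Claim_equal_get_con_list := by
  intro l _
  unfold Spec_get_con_list
  exact get_con_list_eq_alt l
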